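-- pv_equiv track=rewrite | github.com/jeongmo-bae/codingTest | python/programmers/basic/hash_ponketmon.py | solution
-- ===== SOURCE A (Python) =====
-- def solution(nums):
--     distinct_list = []
--     N = nums.__len__() // 2
--     for num in nums :
--         if num not in distinct_list:
--             distinct_list.append(num)
--     if N > distinct_list.__len__() :
--         answer = distinct_list.__len__()
--     else :
--         answer = N
--     return answer
-- ===== SOURCE B (Python) =====
-- def solution(nums):
--     s = sorted(nums)
--     distinct = 0
--     prev = None
--     for x in s:
--         if prev is None or x != prev:
--             distinct += 1
--         prev = x
--     return min(len(nums) // 2, distinct)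
-- ===== Notes on version B (the rewrite author's own statement) =====
-- stated objective: faster
-- what changed: Counts distinct elements by sorting and one adjacent-comparison pass instead of a quadratic membership-scan list build, then returns min(len//2, distinct).
import Mathlib
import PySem

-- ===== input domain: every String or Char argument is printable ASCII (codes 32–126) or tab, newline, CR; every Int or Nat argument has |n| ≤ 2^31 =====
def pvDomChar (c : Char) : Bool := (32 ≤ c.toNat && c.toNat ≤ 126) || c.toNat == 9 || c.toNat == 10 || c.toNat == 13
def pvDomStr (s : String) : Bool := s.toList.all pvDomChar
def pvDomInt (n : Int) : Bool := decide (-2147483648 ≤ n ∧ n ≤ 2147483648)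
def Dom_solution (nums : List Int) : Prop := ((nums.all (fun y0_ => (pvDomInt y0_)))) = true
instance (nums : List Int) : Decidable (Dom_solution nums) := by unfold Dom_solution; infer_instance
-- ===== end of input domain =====

-- B replaces A's quadratic membership-scan distinct count by sort + one adjacent-comparison pass (O(n log n)); return value unchanged.

-- ===== PORT A =====
-- the loop body: append num iff it is not yet in distinct_list
def aStep (acc : List Int) (num : Int) : List Int :=
  if num ∉ acc then acc ++ [num] else acc

def solution (nums : List Int) : Int :=
  let N : Int := PySem.Int.floordiv (nums.length : Int) 2
  let distinct_list := nums.foldl aStep []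
  if N > (distinct_list.length : Int) then (distinct_list.length : Int) else N

-- ===== PORT B =====
-- the loop body: state (distinct, prev); bump distinct when prev is None or x != prev
def bStep (st : Int × Option Int) (x : Int) : Int × Option Int :=
  ((match st.2 with
    | none => st.1 + 1
    | some p => if x ≠ p then st.1 + 1 else st.1), some x)

def solution_alt (nums : List Int) : Int :=
  let s := PySem.List.sorted nums (fun x => x) false
  let distinct := (s.foldl bStep (0, none)).1
  min (PySem.Int.floordiv (nums.length : Int) 2) distinct

-- ===== PRECONDITION & SPEC =====
def Spec_solution (nums : List Int) (out : Int) : Prop := out = solution_alt nums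
instance (nums : List Int) (out : Int) : Decidable (Spec_solution nums out) := by unfold Spec_solution; infer_instance

-- ===== CLAIM (what is proved, stated in full; the proofs are below) =====
def Claim_equal_solution : Prop := ∀ (nums : List Int), Dom_solution nums → Spec_solution nums (solution nums)

-- ===== LEMMAS AND PROOFS =====

theorem card_insert_int (T : Finset Int) (x : Int) :
    ((insert x T).card : Int) = 1 + ((T.erase x).card : Int) := by
  by_cases h : x ∈ T
  · have h1 : (T.erase x).card + 1 = T.card := Finset.card_erase_add_one h
    have h2 : insert x T = T := Finset.insert_eq_self.mpr h
    rw [h2]; omega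
  · rw [Finset.card_insert_of_notMem h, Finset.erase_eq_of_notMem h]; omega

-- A's fold builds a Nodup list whose finset is acc's ∪ l's
theorem aFold_spec (l : List Int) : ∀ (acc : List Int), acc.Nodup →
    (l.foldl aStep acc).Nodup ∧ (l.foldl aStep acc).toFinset = acc.toFinset ∪ l.toFinset := by
  induction l with
  | nil => intro acc h; simp [h]
  | cons x xs ih =>
      intro acc h
      simp only [List.foldl_cons]
      by_cases hx : x ∈ acc
      · have := ih acc h
        rw [aStep, if_neg (by simpa using hx)]
        refine ⟨this.1, ?_⟩
        rw [this.2]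
        ext y
        simp only [Finset.mem_union, List.toFinset_cons, Finset.mem_insert, List.mem_toFinset]
        constructor
        · rintro (hy | hy) <;> tauto
        · rintro (hy | hy | hy)
          · exact Or.inl hy
          · exact Or.inl (hy ▸ hx)
          · exact Or.inr hy
      · have hnd : (acc ++ [x]).Nodup := by
          simp [List.nodup_append, h]
          intro a ha rfl
          exact hx ha
        have := ih (acc ++ [x]) hnd
        rw [aStep, if_pos (by simpa using hx)]
        refine ⟨this.1, ?_⟩
        rw [this.2]
        ext y
        simp only [Finset.mem_union, List.toFinset_append, List.toFinset_cons,
          Finset.mem_insert, List.mem_toFinset, List.toFinset_nil]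
        tauto

theorem aCount (nums : List Int) :
    ((nums.foldl aStep []).length : Int) = (nums.toFinset.card : Int) := by
  have h := aFold_spec nums [] List.nodup_nil
  have hc : (nums.foldl aStep []).toFinset.card = (nums.foldl aStep []).length :=
    List.toFinset_card_of_nodup h.1
  rw [← hc, h.2]
  simp

-- B's fold on a sorted tail, previous element p below every element of l
theorem bFold_some (l : List Int) : ∀ (d p : Int), l.Pairwise (· ≤ ·) → (∀ y ∈ l, p ≤ y) →
    (l.foldl bStep (d, some p)).1 = d + ((l.toFinset.erase p).card : Int) := by
  induction l with
  | nil => intro d p _ _; simp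
  | cons x xs ih =>
      intro d p hs hb
      have hs' : xs.Pairwise (· ≤ ·) := (List.pairwise_cons.mp hs).2
      have hx : ∀ y ∈ xs, x ≤ y := (List.pairwise_cons.mp hs).1
      simp only [List.foldl_cons, bStep]
      by_cases hpx : p = x
      · subst hpx
        rw [if_neg (by simp)]
        rw [ih d p hs' hx]
        congr 2
        rw [List.toFinset_cons, Finset.erase_insert_eq_erase]
      · rw [if_pos (Ne.symm hpx)]
        rw [ih (d + 1) x hs' hx]
        have hplt : ∀ y ∈ (x :: xs), p < y := by
          intro y hy
          rcases List.mem_cons.mp hy with rfl | hy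
          · exact lt_of_le_of_ne (hb y (List.mem_cons_self)) hpx
          · exact lt_of_lt_of_le (lt_of_le_of_ne (hb x List.mem_cons_self) hpx) (hx y hy)
        have hpnot : p ∉ (x :: xs).toFinset := by
          simp only [List.mem_toFinset]
          intro hmem
          exact absurd rfl (ne_of_lt (hplt p hmem))
        rw [Finset.erase_eq_of_notMem hpnot, List.toFinset_cons, card_insert_int]
        ring

theorem bCount (l : List Int) (hs : l.Pairwise (· ≤ ·)) :
    (l.foldl bStep (0, none)).1 = (l.toFinset.card : Int) := by
  cases l with
  | nil => simp
  | cons x xs =>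
      have hs' : xs.Pairwise (· ≤ ·) := (List.pairwise_cons.mp hs).2
      have hx : ∀ y ∈ xs, x ≤ y := (List.pairwise_cons.mp hs).1
      simp only [List.foldl_cons, bStep]
      rw [show ((0:Int)+1) = 1 from rfl, bFold_some xs 1 x hs' hx, List.toFinset_cons, card_insert_int]

-- ===== VERDICT (by name: the statement is the Claim_ definition above) =====
theorem solution_spec : Claim_equal_solution := by
  intro nums _
  unfold Spec_solution solution solution_alt
  have hperm : (PySem.List.sorted nums (fun x => x) false).Perm nums := PySem.List.sorted_perm nums (fun x => x) false
  have hpair : (PySem.List.sorted nums (fun x => x) false).Pairwise (· ≤ ·) := by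
    have := PySem.List.sorted_pairwise (xs := nums) (key := fun x : Int => x)
    simpa using this
  have hfs : (PySem.List.sorted nums (fun x => x) false).toFinset = nums.toFinset := by
    ext y
    simp [List.mem_toFinset, hperm.mem_iff]
  have hb := bCount _ hpair
  rw [hfs] at hb
  have ha := aCount nums
  show (if PySem.Int.floordiv (nums.length : Int) 2 > ((nums.foldl aStep []).length : Int)
        then ((nums.foldl aStep []).length : Int)
        else PySem.Int.floordiv (nums.length : Int) 2) =
      min (PySem.Int.floordiv (nums.length : Int) 2)
        ((PySem.List.sorted nums (fun x => x) false).foldl bStep (0, none)).1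
  rw [hb, ← ha, min_def]
  split_ifs <;> omega
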